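-- pv_equiv track=rewrite | github.com/chibbargroup/CentralRepository | GBS_Analysis/loc_generator_1.py | Scaffold_Repeat_Remover
-- ===== SOURCE A (Python) =====
-- from collections import OrderedDict
--
-- def Scaffold_Repeat_Remover(data):
-- 	new_data = OrderedDict()
-- 	blank_count_dict = {}
-- 	for key in data:
-- 		scaffold = '_'.join(key.split('_')[0:-2])
-- 		allele_list = data[key].split('\t')
-- 		sample_blanks = allele_list.count('-')
-- 		if scaffold not in new_data.keys():
-- 			new_data[scaffold] = data[key]
-- 			blank_count_dict[scaffold] = sample_blanks
-- 		else:
-- 			if sample_blanks < blank_count_dict[scaffold]: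
-- 				new_data[scaffold] = data[key]
-- 				blank_count_dict[scaffold] = sample_blanks
-- 	return new_data
-- ===== SOURCE B (Python) =====
-- from collections import OrderedDict
--
-- def Scaffold_Repeat_Remover(data):
-- 	pairs = [('_'.join(key.split('_')[0:-2]), data[key]) for key in data]
-- 	groups = OrderedDict()
-- 	for s, v in pairs:
-- 		groups.setdefault(s, []).append(v)
-- 	return OrderedDict((s, min(rows, key=lambda r: r.split('\t').count('-')))
-- 	                   for s, rows in groups.items())
-- ===== Notes on version B (the rewrite author's own statement) =====
-- stated objective: alternative
-- what changed: Replaces the running-min loop with two parallel dicts by a group-then-reduce pass: one pass groups all row values per scaffold prefix in encounter order, then each group is reduced with min(key=blank count), whose first-minimal tie rule matches A's strict '<'.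
import Mathlib
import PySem

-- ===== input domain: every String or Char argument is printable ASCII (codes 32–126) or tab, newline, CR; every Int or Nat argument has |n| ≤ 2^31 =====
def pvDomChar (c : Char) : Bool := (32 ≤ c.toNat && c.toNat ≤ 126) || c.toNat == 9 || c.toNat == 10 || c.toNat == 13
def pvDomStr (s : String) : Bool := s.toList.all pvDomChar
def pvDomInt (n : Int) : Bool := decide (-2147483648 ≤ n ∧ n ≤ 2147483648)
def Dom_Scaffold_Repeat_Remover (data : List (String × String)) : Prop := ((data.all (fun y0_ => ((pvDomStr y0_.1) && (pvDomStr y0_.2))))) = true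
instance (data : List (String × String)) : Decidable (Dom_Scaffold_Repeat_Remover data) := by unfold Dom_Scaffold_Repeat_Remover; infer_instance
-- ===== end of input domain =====

-- B replaces A's running-min loop over two parallel dicts by a group-then-reduce pass (same cost); return values are proved equal on all inputs.

-- ===== PORT A =====
-- '_'.join(key.split('_')[0:-2])  (this expression appears verbatim in both Pythons)
def pvScaffold (key : String) : String :=
  PySem.Str.join "_" (PySem.List.slice ((PySem.Str.split? key "_").getD []) (some 0) (some (-2)))

-- <row>.split('\t').count('-')  (this expression appears verbatim in both Pythons)
def pvBlanks (v : String) : Nat :=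
  PySem.List.count ((PySem.Str.split? v "\t").getD []) "-"

def Scaffold_Repeat_Remover (data : List (String × String)) : List (String × String) :=
  (data.foldl (fun st kv =>
      let scaffold := pvScaffold kv.1
      let sample_blanks := pvBlanks kv.2
      if st.1.contains scaffold = false then
        (st.1.insert scaffold kv.2, st.2.insert scaffold sample_blanks)
      else
        if sample_blanks < st.2.getD scaffold 0 then
          (st.1.insert scaffold kv.2, st.2.insert scaffold sample_blanks)
        else st)
    ((PySem.Dict.empty : PySem.Dict String String), (PySem.Dict.empty : PySem.Dict String Nat))).1.items

-- ===== PORT B =====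
def Scaffold_Repeat_Remover_alt (data : List (String × String)) : List (String × String) :=
  let pairs := data.map (fun kv => (pvScaffold kv.1, kv.2))
  let groups := pairs.foldl (fun g p => g.modify p.1 [] (fun rows => rows ++ [p.2]))
      (PySem.Dict.empty : PySem.Dict String (List String))
  groups.items.map (fun p => (p.1, (PySem.List.min? p.2 (fun r => pvBlanks r)).getD ""))

-- ===== PRECONDITION & SPEC =====
def Spec_Scaffold_Repeat_Remover (data : List (String × String)) (out : List (String × String)) : Prop := out = Scaffold_Repeat_Remover_alt data
instance (data : List (String × String)) (out : List (String × String)) : Decidable (Spec_Scaffold_Repeat_Remover data out) := by unfold Spec_Scaffold_Repeat_Remover; infer_instance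

-- ===== CLAIM (what is proved, stated in full; the proofs are below) =====
def Claim_equal_Scaffold_Repeat_Remover : Prop := ∀ (data : List (String × String)), Dom_Scaffold_Repeat_Remover data → Spec_Scaffold_Repeat_Remover data (Scaffold_Repeat_Remover data)

-- ===== LEMMAS AND PROOFS =====

-- A's loop body, named for the proofs (definitionally the lambda inside Scaffold_Repeat_Remover)
def pvStepA (st : PySem.Dict String String × PySem.Dict String Nat) (kv : String × String) :
    PySem.Dict String String × PySem.Dict String Nat :=
  let scaffold := pvScaffold kv.1
  let sample_blanks := pvBlanks kv.2
  if st.1.contains scaffold = false then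
    (st.1.insert scaffold kv.2, st.2.insert scaffold sample_blanks)
  else
    if sample_blanks < st.2.getD scaffold 0 then
      (st.1.insert scaffold kv.2, st.2.insert scaffold sample_blanks)
    else st

-- the row values grouped under scaffold s, in encounter order
def pvVals (s : String) (l : List (String × String)) : List String :=
  ((l.map (fun kv => (pvScaffold kv.1, kv.2))).filter (fun p => p.1 == s)).map (fun p => p.2)

lemma pvVals_append (s : String) (l : List (String × String)) (kv : String × String) :
    pvVals s (l ++ [kv]) = pvVals s l ++ (if pvScaffold kv.1 = s then [kv.2] else []) := by
  simp only [pvVals, List.map_append, List.filter_append, List.map_append]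
  by_cases h : pvScaffold kv.1 = s <;> simp [h]

lemma pvMin?_append_singleton {α κ : Type} [LT κ] [DecidableLT κ] (xs : List α) (v : α) (key : α → κ) :
    PySem.List.min? (xs ++ [v]) key =
      match PySem.List.min? xs key with
      | none => some v
      | some m => if key v < key m then some v else some m := by
  simp only [PySem.List.min?, List.foldl_append, List.foldl_cons, List.foldl_nil]
  rfl

lemma pvSetOfList_append {α : Type} [BEq α] (xs : List α) (a : α) :
    PySem.Set.ofList (xs ++ [a]) = PySem.Set.add (PySem.Set.ofList xs) a := by
  rw [PySem.Set.ofList_eq_foldl, PySem.Set.ofList_eq_foldl, List.foldl_append]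
  rfl

lemma pvInvA (l : List (String × String)) :
    ((l.foldl pvStepA (PySem.Dict.empty, PySem.Dict.empty)).1.keys
        = PySem.Set.ofList (l.map (fun kv => pvScaffold kv.1))) ∧
    (l.foldl pvStepA (PySem.Dict.empty, PySem.Dict.empty)).1.keys.Nodup ∧
    (∀ s, (l.foldl pvStepA (PySem.Dict.empty, PySem.Dict.empty)).1.get? s
        = PySem.List.min? (pvVals s l) pvBlanks) ∧
    (∀ s, (l.foldl pvStepA (PySem.Dict.empty, PySem.Dict.empty)).2.get? s
        = (PySem.List.min? (pvVals s l) pvBlanks).map pvBlanks) := by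
  induction l using List.reverseRecOn with
  | nil =>
    refine ⟨rfl, ?_, fun s => ?_, fun s => ?_⟩ <;>
      simp [pvVals, PySem.List.min?, PySem.Dict.get?_empty, PySem.Dict.keys_empty]
  | append_singleton l kv ih =>
    obtain ⟨hk, hnd, h1, h2⟩ := ih
    simp only [List.foldl_append, List.foldl_cons, List.foldl_nil]
    set st := l.foldl pvStepA (PySem.Dict.empty, PySem.Dict.empty) with hst
    have hcontains : st.1.contains (pvScaffold kv.1)
        = (PySem.List.min? (pvVals (pvScaffold kv.1) l) pvBlanks).isSome := by
      rw [PySem.Dict.contains_eq_isSome_get?, h1]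
    rcases hmin : PySem.List.min? (pvVals (pvScaffold kv.1) l) pvBlanks with _ | m
    · -- scaffold not seen yet
      have hc : st.1.contains (pvScaffold kv.1) = false := by rw [hcontains, hmin]; rfl
      have hvnil : pvVals (pvScaffold kv.1) l = [] :=
        (PySem.List.min?_eq_none_iff _ _).mp hmin
      have hnmem : pvScaffold kv.1 ∉ PySem.Set.ofList (l.map (fun kv => pvScaffold kv.1)) := by
        rw [← hk]
        intro hmem
        rw [(PySem.Dict.contains_iff_mem_keys _ _).mpr hmem] at hc
        exact Bool.true_eq_false.mp hc
      have hstep : pvStepA st kv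
          = (st.1.insert (pvScaffold kv.1) kv.2, st.2.insert (pvScaffold kv.1) (pvBlanks kv.2)) := by
        simp [pvStepA, hc]
      rw [hstep]
      refine ⟨?_, ?_, fun s => ?_, fun s => ?_⟩
      · show (st.1.insert (pvScaffold kv.1) kv.2).keys = _
        rw [PySem.Dict.keys_insert_of_not_contains st.1 kv.2 hc, hk]
        simp [List.map_append, pvSetOfList_append, PySem.Set.add, hnmem]
      · exact PySem.Dict.nodup_keys_insert _ _ _ hnd
      · show (st.1.insert (pvScaffold kv.1) kv.2).get? s = _
        rw [PySem.Dict.get?_insert, pvVals_append]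
        by_cases hs : s = pvScaffold kv.1
        · subst hs; simp [hvnil, PySem.List.min?]
        · rw [if_neg hs, if_neg (fun h : pvScaffold kv.1 = s => hs h.symm),
              List.append_nil, h1]
      · show (st.2.insert (pvScaffold kv.1) (pvBlanks kv.2)).get? s = _
        rw [PySem.Dict.get?_insert, pvVals_append]
        by_cases hs : s = pvScaffold kv.1
        · subst hs; simp [hvnil, PySem.List.min?]
        · rw [if_neg hs, if_neg (fun h : pvScaffold kv.1 = s => hs h.symm),
              List.append_nil, h2]
    · -- scaffold already present, current best m
      have hc : st.1.contains (pvScaffold kv.1) = true := by rw [hcontains, hmin]; rfl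
      have hbc : st.2.getD (pvScaffold kv.1) 0 = pvBlanks m := by
        rw [PySem.Dict.getD_eq_get?_getD, h2, hmin]; rfl
      have hmem : pvScaffold kv.1 ∈ PySem.Set.ofList (l.map (fun kv => pvScaffold kv.1)) := by
        rw [← hk]; exact (PySem.Dict.contains_iff_mem_keys _ _).mp hc
      have hkeys : PySem.Set.ofList ((l ++ [kv]).map (fun kv => pvScaffold kv.1))
          = PySem.Set.ofList (l.map (fun kv => pvScaffold kv.1)) := by
        simp [List.map_append, pvSetOfList_append, PySem.Set.add, hmem]
      by_cases hlt : pvBlanks kv.2 < pvBlanks m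
      · have hstep : pvStepA st kv
            = (st.1.insert (pvScaffold kv.1) kv.2, st.2.insert (pvScaffold kv.1) (pvBlanks kv.2)) := by
          simp [pvStepA, hc, hbc, hlt]
        rw [hstep]
        refine ⟨?_, ?_, fun s => ?_, fun s => ?_⟩
        · show (st.1.insert (pvScaffold kv.1) kv.2).keys = _
          rw [PySem.Dict.keys_insert_of_contains st.1 kv.2 hc, hk, hkeys]
        · exact PySem.Dict.nodup_keys_insert _ _ _ hnd
        · show (st.1.insert (pvScaffold kv.1) kv.2).get? s = _
          rw [PySem.Dict.get?_insert, pvVals_append]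
          by_cases hs : s = pvScaffold kv.1
          · subst hs
            rw [if_pos rfl, if_pos rfl, pvMin?_append_singleton, hmin]
            simp [hlt]
          · rw [if_neg hs, if_neg (fun h : pvScaffold kv.1 = s => hs h.symm),
                List.append_nil, h1]
        · show (st.2.insert (pvScaffold kv.1) (pvBlanks kv.2)).get? s = _
          rw [PySem.Dict.get?_insert, pvVals_append]
          by_cases hs : s = pvScaffold kv.1
          · subst hs
            rw [if_pos rfl, if_pos rfl, pvMin?_append_singleton, hmin]
            simp [hlt]
          · rw [if_neg hs, if_neg (fun h : pvScaffold kv.1 = s => hs h.symm),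
                List.append_nil, h2]
      · have hstep : pvStepA st kv = st := by
          simp [pvStepA, hc, hbc, hlt]
        rw [hstep]
        refine ⟨?_, ?_, fun s => ?_, fun s => ?_⟩
        · rw [hkeys]; exact hk
        · exact hnd
        · rw [pvVals_append]
          by_cases hs : s = pvScaffold kv.1
          · subst hs
            rw [if_pos rfl, pvMin?_append_singleton, hmin, h1, hmin]
            simp [hlt]
          · rw [if_neg (fun h : pvScaffold kv.1 = s => hs h.symm),
                List.append_nil, h1]
        · rw [pvVals_append]
          by_cases hs : s = pvScaffold kv.1
          · subst hs
            rw [if_pos rfl, pvMin?_append_singleton, hmin, h2, hmin]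
            simp [hlt]
          · rw [if_neg (fun h : pvScaffold kv.1 = s => hs h.symm),
                List.append_nil, h2]

lemma pvAEq (data : List (String × String)) :
    Scaffold_Repeat_Remover data
      = (PySem.Set.ofList (data.map (fun kv => pvScaffold kv.1))).map
          (fun s => (s, (PySem.List.min? (pvVals s data) pvBlanks).getD "")) := by
  obtain ⟨hk, hnd, h1, _⟩ := pvInvA data
  show (data.foldl pvStepA (PySem.Dict.empty, PySem.Dict.empty)).1.items = _
  rw [PySem.Dict.items_eq_map_keys _ hnd "", hk]
  refine List.map_congr_left (fun s _ => ?_)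
  rw [PySem.Dict.getD_eq_get?_getD, h1]

lemma pvAltEq (data : List (String × String)) :
    Scaffold_Repeat_Remover_alt data
      = (PySem.Set.ofList (data.map (fun kv => pvScaffold kv.1))).map
          (fun s => (s, (PySem.List.min? (pvVals s data) pvBlanks).getD "")) := by
  have hB : Scaffold_Repeat_Remover_alt data
      = ((data.map (fun kv => (pvScaffold kv.1, kv.2))).foldl
          (fun g p => g.modify p.1 [] (fun rows => rows ++ [p.2]))
          (PySem.Dict.empty : PySem.Dict String (List String))).items.map
          (fun p => (p.1, (PySem.List.min? p.2 (fun r => pvBlanks r)).getD "")) := rfl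
  rw [hB]
  set pairs := data.map (fun kv => (pvScaffold kv.1, kv.2)) with hpairs
  set groups := pairs.foldl (fun g p => g.modify p.1 [] (fun rows => rows ++ [p.2]))
      (PySem.Dict.empty : PySem.Dict String (List String)) with hgroups
  have hnd : groups.keys.Nodup := by
    rw [hgroups]
    exact PySem.Dict.nodup_keys_foldl_modify_key pairs Prod.fst [] (fun _ p rows => rows ++ [p.2]) _
      (by simp [PySem.Dict.keys_empty])
  have hkeys : groups.keys = PySem.Set.ofList (data.map (fun kv => pvScaffold kv.1)) := by
    rw [hgroups]
    rw [PySem.Dict.keys_foldl_modify_key pairs Prod.fst [] (fun _ p rows => rows ++ [p.2]) _]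
    rw [PySem.Set.ofList_eq_foldl, hpairs, List.map_map]
    rfl
  have hget : ∀ s, groups.getD s [] = pvVals s data := by
    intro s
    rw [hgroups, PySem.Dict.getD_foldl_modify_append]
    simp [PySem.Dict.getD_empty, pvVals, hpairs]
  rw [PySem.Dict.items_eq_map_keys _ hnd [], hkeys, List.map_map]
  exact List.map_congr_left (fun s _ => by simp [Function.comp, hget s])

-- ===== VERDICT (by name: the statement is the Claim_ definition above) =====
theorem Scaffold_Repeat_Remover_spec : Claim_equal_Scaffold_Repeat_Remover := by
  intro data _
  unfold Spec_Scaffold_Repeat_Remover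
  rw [pvAEq, pvAltEq]
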